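-- pv_equiv track=rewrite | github.com/andrewkvu/leetcode_grind | 2365-task-scheduler-ii/2365-task-scheduler-ii.py | taskSchedulerII
-- ===== SOURCE A (Python) =====
-- from typing import List
--
-- def taskSchedulerII(tasks: List[int], space: int) -> int:
--     m, currDay = {}, 0
--     for i, task in enumerate(tasks):
--         currDay += 1
--         # just a math equation 3->5 ---> increase by 2 days which is space + 1 - currDay - m[task]
--         if task in m and currDay - m[task] < space + 1:
--             currDay += (space + 1) - (currDay - m[task])
--         m[task] = currDay
--     return currDay
-- ===== SOURCE B (Python) =====
-- def taskSchedulerII(tasks, space):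
--     # pass 1: previous-occurrence index for each position (-1 if none)
--     last, prev = {}, []
--     for i, t in enumerate(tasks):
--         prev.append(last.get(t, -1))
--         last[t] = i
--     # pass 2: DP over completion days, indexed by predecessor links
--     d = []
--     for p in prev:
--         before = d[-1] if d else 0
--         follow = d[p] + space + 1 if p >= 0 else 0
--         d.append(max(before + 1, follow))
--     return d[-1] if d else 0
-- ===== Notes on version B (the rewrite author's own statement) =====
-- stated objective: alternative
-- what changed: B replaces A's single dict-driven simulation with two staged passes: first it computes each position's previous-occurrence index (the dict of last completion days disappears from the scheduling step), then a DP over an array of completion days d[i] = max(d[i-1]+1, d[prev]+space+1) with random access via the predecessor links.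
import Mathlib
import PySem

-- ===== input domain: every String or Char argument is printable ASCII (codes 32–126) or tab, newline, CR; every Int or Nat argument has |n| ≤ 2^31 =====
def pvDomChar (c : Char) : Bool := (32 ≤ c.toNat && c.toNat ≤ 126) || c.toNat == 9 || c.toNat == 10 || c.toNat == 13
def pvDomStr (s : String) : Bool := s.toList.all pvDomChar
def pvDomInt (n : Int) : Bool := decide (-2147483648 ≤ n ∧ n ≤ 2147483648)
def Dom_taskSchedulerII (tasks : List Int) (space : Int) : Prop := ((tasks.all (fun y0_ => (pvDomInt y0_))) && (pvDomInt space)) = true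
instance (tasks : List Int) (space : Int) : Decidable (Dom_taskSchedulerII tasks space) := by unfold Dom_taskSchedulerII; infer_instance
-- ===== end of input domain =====

-- B replaces A's single dict-driven simulation by two staged passes: first compute each
-- position's previous-occurrence index, then a DP over an array of completion days
-- d[i] = max(d[i-1]+1, d[prev]+space+1); same value, different decomposition.

-- ===== PORT A =====
-- one iteration of A's loop body over state (m, currDay)
def stepA_taskSchedulerII (space : Int) (st : PySem.Dict Int Int × Int) (task : Int) :
    PySem.Dict Int Int × Int :=
  let currDay := st.2 + 1
  let currDay :=
    match st.1.get? task with
    | some v => if currDay - v < space + 1 then currDay + ((space + 1) - (currDay - v)) else currDay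
    | none => currDay
  (st.1.insert task currDay, currDay)

def taskSchedulerII (tasks : List Int) (space : Int) : Int :=
  (tasks.foldl (stepA_taskSchedulerII space) (PySem.Dict.empty, 0)).2

-- ===== PORT B =====
-- pass 1: state (last, i, prev) — previous-occurrence index for each position (-1 if none)
def prevStep_taskSchedulerII (st : PySem.Dict Int Int × Int × List Int) (t : Int) :
    PySem.Dict Int Int × Int × List Int :=
  (st.1.insert t st.2.1, st.2.1 + 1, st.2.2 ++ [st.1.getD t (-1)])

-- pass 2: d[p] — exact: pass 1 only stores indices of strictly earlier positions, so
-- whenever 0 ≤ p Python's d[p] is in range and the `.getD 0` default is never taken.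
def dpStep_taskSchedulerII (space : Int) (d : List Int) (p : Int) : List Int :=
  let before := if d = [] then 0 else (PySem.List.pyGet? d (-1)).getD 0
  let follow := if 0 ≤ p then (PySem.List.pyGet? d p).getD 0 + space + 1 else 0
  d ++ [max (before + 1) follow]

def taskSchedulerII_alt (tasks : List Int) (space : Int) : Int :=
  let prev := (tasks.foldl prevStep_taskSchedulerII (PySem.Dict.empty, 0, [])).2.2
  let d := prev.foldl (dpStep_taskSchedulerII space) []
  if d = [] then 0 else (PySem.List.pyGet? d (-1)).getD 0

-- ===== PRECONDITION & SPEC =====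
def Spec_taskSchedulerII (tasks : List Int) (space : Int) (out : Int) : Prop := out = taskSchedulerII_alt tasks space
instance (tasks : List Int) (space : Int) (out : Int) : Decidable (Spec_taskSchedulerII tasks space out) := by unfold Spec_taskSchedulerII; infer_instance

-- ===== CLAIM (what is proved, stated in full; the proofs are below) =====
def Claim_equal_taskSchedulerII : Prop := ∀ (tasks : List Int) (space : Int), Dom_taskSchedulerII tasks space → Spec_taskSchedulerII tasks space (taskSchedulerII tasks space)

-- ===== LEMMAS AND PROOFS =====

-- "last element or 0", B's read-out of the DP array
def pvLastD (d : List Int) : Int := if d = [] then 0 else (PySem.List.pyGet? d (-1)).getD 0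

theorem pvLastD_append (d : List Int) (x : Int) : pvLastD (d ++ [x]) = x := by
  unfold pvLastD
  rw [if_neg (by simp), PySem.List.pyGet?_neg_one_append_singleton]
  rfl

theorem pyGet?_append_left_of (xs ys : List Int) (i : Int) (h0 : 0 ≤ i)
    (h1 : i < (xs.length : Int)) :
    PySem.List.pyGet? (xs ++ ys) i = PySem.List.pyGet? xs i := by
  rw [PySem.List.pyGet?_of_nonneg (xs ++ ys) h0]
  rw [PySem.List.pyGet?_of_nonneg xs h0]
  rw [List.getElem?_append_left (by omega)]

-- the joint loop invariant of A's fold, B's pass-1 fold and B's pass-2 fold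
theorem pv_inv (space : Int) (tasks : List Int) :
    (tasks.foldl prevStep_taskSchedulerII (PySem.Dict.empty, 0, ([] : List Int))).2.1
        = (tasks.length : Int) ∧
    ((tasks.foldl prevStep_taskSchedulerII (PySem.Dict.empty, 0, ([] : List Int))).2.2.foldl
        (dpStep_taskSchedulerII space) []).length = tasks.length ∧
    0 ≤ (tasks.foldl (stepA_taskSchedulerII space) (PySem.Dict.empty, 0)).2 ∧
    (tasks.foldl (stepA_taskSchedulerII space) (PySem.Dict.empty, 0)).2
        = pvLastD ((tasks.foldl prevStep_taskSchedulerII (PySem.Dict.empty, 0, ([] : List Int))).2.2.foldl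
            (dpStep_taskSchedulerII space) []) ∧
    (∀ t : Int,
      match (tasks.foldl (stepA_taskSchedulerII space) (PySem.Dict.empty, 0)).1.get? t,
            (tasks.foldl prevStep_taskSchedulerII (PySem.Dict.empty, 0, ([] : List Int))).1.get? t with
      | none, none => True
      | some v, some i => 0 ≤ i ∧ i < (tasks.length : Int) ∧
          PySem.List.pyGet?
            ((tasks.foldl prevStep_taskSchedulerII (PySem.Dict.empty, 0, ([] : List Int))).2.2.foldl
              (dpStep_taskSchedulerII space) []) i = some v
      | _, _ => False) := by
  induction tasks using List.reverseRecOn with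
  | nil =>
    refine ⟨rfl, rfl, le_rfl, rfl, ?_⟩
    intro t; simp [PySem.Dict.get?_empty]
  | append_singleton l t ih =>
    obtain ⟨hn, hlen, hpos, hday, hmap⟩ := ih
    set PL := l.foldl prevStep_taskSchedulerII (PySem.Dict.empty, 0, ([] : List Int)) with hPL
    set AL := l.foldl (stepA_taskSchedulerII space) (PySem.Dict.empty, 0) with hAL
    set dL := PL.2.2.foldl (dpStep_taskSchedulerII space) [] with hdL
    simp only [List.foldl_append, List.foldl_cons, List.foldl_nil]
    have hP' : prevStep_taskSchedulerII PL t
        = (PL.1.insert t PL.2.1, PL.2.1 + 1, PL.2.2 ++ [PL.1.getD t (-1)]) := rfl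
    rw [hP']
    have hbefore : (if dL = [] then 0 else (PySem.List.pyGet? dL (-1)).getD 0) = AL.2 := by
      rw [hday]; rfl
    have key := hmap t
    cases hma : AL.1.get? t with
    | none =>
      rw [hma] at key
      cases hmp : PL.1.get? t with
      | some i => rw [hmp] at key; exact absurd key (by simp)
      | none =>
        have hpd : PL.1.getD t (-1) = -1 := by
          rw [PySem.Dict.getD_eq_get?_getD, hmp]; rfl
        have hd' : (PL.2.2 ++ [PL.1.getD t (-1)]).foldl (dpStep_taskSchedulerII space) []
            = dL ++ [AL.2 + 1] := by
          rw [List.foldl_append, List.foldl_cons, List.foldl_nil, ← hdL]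
          unfold dpStep_taskSchedulerII
          rw [hpd]
          simp only [hbefore]
          rw [if_neg (by omega)]
          congr 1
          simp; omega
        have hA' : stepA_taskSchedulerII space AL t = (AL.1.insert t (AL.2 + 1), AL.2 + 1) := by
          unfold stepA_taskSchedulerII; rw [hma]
        rw [hA', hd']
        refine ⟨by simp [hn], by simp [hlen], by omega, by rw [pvLastD_append], ?_⟩
        intro t'
        by_cases ht' : t' = t
        · subst ht'
          rw [PySem.Dict.get?_insert_self, PySem.Dict.get?_insert_self, hn]
          refine ⟨by positivity, by simp only [List.length_append, List.length_cons, List.length_nil]; push_cast; omega, ?_⟩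
          have : (l.length : Int) = ((dL.length : Nat) : Int) := by rw [hlen]
          rw [this, PySem.List.pyGet?_natCast]
          simp
        · rw [PySem.Dict.get?_insert_of_ne (hne := ht'),
              PySem.Dict.get?_insert_of_ne (hne := ht')]
          have key' := hmap t'
          cases h1 : AL.1.get? t' with
          | none => cases h2 : PL.1.get? t' with
            | none => trivial
            | some i => rw [h1, h2] at key'; exact absurd key' (by simp)
          | some v => cases h2 : PL.1.get? t' with
            | none => rw [h1, h2] at key'; exact absurd key' (by simp)
            | some i =>
              rw [h1, h2] at key'
              obtain ⟨hi0, hil, hig⟩ := key'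
              refine ⟨hi0, by simp only [List.length_append, List.length_cons, List.length_nil]; push_cast; omega, ?_⟩
              rw [pyGet?_append_left_of _ _ _ hi0 (by rw [hlen]; exact_mod_cast hil), hig]
    | some v =>
      rw [hma] at key
      cases hmp : PL.1.get? t with
      | none => rw [hmp] at key; exact absurd key (by simp)
      | some i =>
        rw [hmp] at key
        obtain ⟨hi0, hil, hig⟩ := key
        have hpd : PL.1.getD t (-1) = i := by
          rw [PySem.Dict.getD_eq_get?_getD, hmp]; rfl
        have hd' : (PL.2.2 ++ [PL.1.getD t (-1)]).foldl (dpStep_taskSchedulerII space) []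
            = dL ++ [max (AL.2 + 1) (v + space + 1)] := by
          rw [List.foldl_append, List.foldl_cons, List.foldl_nil, ← hdL]
          unfold dpStep_taskSchedulerII
          rw [hpd]
          simp only [hbefore]
          rw [if_pos hi0, hig]
          rfl
        have hA' : stepA_taskSchedulerII space AL t
            = (AL.1.insert t (max (AL.2 + 1) (v + space + 1)), max (AL.2 + 1) (v + space + 1)) := by
          simp only [stepA_taskSchedulerII, hma]
          split_ifs with hc
          · have : AL.2 + 1 + (space + 1 - (AL.2 + 1 - v)) = max (AL.2 + 1) (v + space + 1) := by
              rw [max_eq_right (by omega)]; ring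
            rw [this]
          · rw [max_eq_left (by omega)]
        rw [hA', hd']
        refine ⟨by simp [hn], by simp [hlen], by omega, by rw [pvLastD_append], ?_⟩
        intro t'
        by_cases ht' : t' = t
        · subst ht'
          rw [PySem.Dict.get?_insert_self, PySem.Dict.get?_insert_self, hn]
          refine ⟨by positivity, by simp only [List.length_append, List.length_cons, List.length_nil]; push_cast; omega, ?_⟩
          have : (l.length : Int) = ((dL.length : Nat) : Int) := by rw [hlen]
          rw [this, PySem.List.pyGet?_natCast]
          simp
        · rw [PySem.Dict.get?_insert_of_ne (hne := ht'),
              PySem.Dict.get?_insert_of_ne (hne := ht')]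
          have key' := hmap t'
          cases h1 : AL.1.get? t' with
          | none => cases h2 : PL.1.get? t' with
            | none => trivial
            | some j => rw [h1, h2] at key'; exact absurd key' (by simp)
          | some w => cases h2 : PL.1.get? t' with
            | none => rw [h1, h2] at key'; exact absurd key' (by simp)
            | some j =>
              rw [h1, h2] at key'
              obtain ⟨hj0, hjl, hjg⟩ := key'
              refine ⟨hj0, by simp only [List.length_append, List.length_cons, List.length_nil]; push_cast; omega, ?_⟩
              rw [pyGet?_append_left_of _ _ _ hj0 (by rw [hlen]; exact_mod_cast hjl), hjg]

-- ===== VERDICT (by name: the statement is the Claim_ definition above) =====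
theorem taskSchedulerII_spec : Claim_equal_taskSchedulerII := by
  intro tasks space _
  unfold Spec_taskSchedulerII taskSchedulerII taskSchedulerII_alt
  have h := (pv_inv space tasks).2.2.2.1
  rw [h]; rfl
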